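-- pv_equiv track=rewrite | github.com/eclipse-oniro-mirrors/arkui_ace_engine | test/tools/event_tree_to_graph/build_standalone.py | process_module_content
-- ===== SOURCE A (Python) =====
-- def process_module_content(content, filepath):
--     """Process module content to make it standalone-compatible.
--
--     Args:
--         content: The Python file content
--         filepath: Path to the module file
--
--     Returns:
--         Processed content ready for inclusion in standalone script
--     """
--     lines = content.split('\n')
--     processed_lines = []
--
--     # Skip shebang and encoding for non-main modules
--     if filepath != 'main.py':
--         # Skip first two lines if they are shebang/encoding
--         if lines and lines[0].startswith('#!'):
--             lines = lines[1:]
--         if lines and (lines[0].startswith('# -*-') or lines[0].startswith('# coding')):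
--             lines = lines[1:]
--
--     # Track if we've seen any actual code
--     seen_code = False
--     skip_import_continuation = False
--
--     for i, line in enumerate(lines):
--         # Skip copyright header for non-main modules (keep only for main.py)
--         if filepath != 'main.py' and not seen_code:
--             if line.startswith('#') or line.strip() == '':
--                 continue
--             seen_code = True
--
--         # Handle multi-line import continuation
--         if skip_import_continuation:
--             # Comment out continuation lines
--             processed_lines.append(f'# {line}')
--             # Check if continuation ends (no backslash)
--             if not line.rstrip().endswith('\\'):
--                 skip_import_continuation = False
--             continue
--
--         # Modify imports to use local namespace
--         # Remove "from src." imports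
--         if line.strip().startswith('from src.') or line.strip().startswith('from .'):
--             # Convert "from src.xyz import abc" to "# import abc (inlined)"
--             processed_lines.append(f'# {line}')
--             # Check if line ends with backslash (continuation)
--             if line.rstrip().endswith('\\'):
--                 skip_import_continuation = True
--             continue
--
--         # Modify "import src.xxx" imports
--         if 'import src.' in line:
--             processed_lines.append(f'# {line}')
--             # Check if line ends with backslash (continuation)
--             if line.rstrip().endswith('\\'):
--                 skip_import_continuation = True
--             continue
--
--         # Keep everything else
--         processed_lines.append(line)
--
--     return '\n'.join(processed_lines)
-- ===== SOURCE B (Python) =====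
-- def process_module_content(content, filepath):
--     """Header-trim pass plus block-consuming import loop (same result as the
--     flag-based state machine)."""
--     lines = content.split('\n')
--
--     # Pass 1: for non-main modules, compute the effective start of the body:
--     # drop a shebang, then an encoding line, then the leading comment/blank run.
--     if filepath != 'main.py':
--         if lines and lines[0].startswith('#!'):
--             lines = lines[1:]
--         if lines and (lines[0].startswith('# -*-') or lines[0].startswith('# coding')):
--             lines = lines[1:]
--         start = 0
--         while start < len(lines) and (lines[start].startswith('#') or lines[start].strip() == ''):
--             start += 1
--         lines = lines[start:]
--
--     # Pass 2: index loop; an import line is commented out together with its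
--     # whole backslash-continuation block by an inner loop.
--     out = []
--     i = 0
--     n = len(lines)
--     while i < n:
--         line = lines[i]
--         if (line.strip().startswith('from src.') or line.strip().startswith('from .')
--                 or 'import src.' in line):
--             out.append('# ' + line)
--             i += 1
--             while line.rstrip().endswith('\\') and i < n:
--                 line = lines[i]
--                 out.append('# ' + line)
--                 i += 1
--         else:
--             out.append(line)
--             i += 1
--     return '\n'.join(out)
-- ===== Notes on version B (the rewrite author's own statement) =====
-- stated objective: alternative
-- what changed: Replaced the flag-based state machine (seen_code / skip_import_continuation booleans carried through one for-loop) by a two-pass design: a header-trim preprocessing step that computes the effective body slice, then an index loop that comments an import line together with its whole backslash-continuation block in a dedicated inner loop.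
import Mathlib
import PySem

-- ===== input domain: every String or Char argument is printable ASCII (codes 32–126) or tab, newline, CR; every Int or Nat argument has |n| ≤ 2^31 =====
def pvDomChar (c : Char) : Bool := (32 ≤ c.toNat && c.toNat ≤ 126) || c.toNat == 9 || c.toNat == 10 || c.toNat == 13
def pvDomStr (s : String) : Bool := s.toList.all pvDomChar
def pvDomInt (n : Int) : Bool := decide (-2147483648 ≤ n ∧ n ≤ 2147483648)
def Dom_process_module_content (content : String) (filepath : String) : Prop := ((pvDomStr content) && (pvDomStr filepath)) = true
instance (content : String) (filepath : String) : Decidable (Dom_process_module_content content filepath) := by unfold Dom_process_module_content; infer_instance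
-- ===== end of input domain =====

-- B is an alternative decomposition of A (header-trim pass + block-consuming inner loop
-- instead of A's flag-based state machine); same cost, same result.

-- shared line predicates (each is one Python test both programs perform verbatim)
def pmcIsHeader (l : String) : Bool :=
  PySem.Str.startswith l "#" || (PySem.Str.strip l == "")

def pmcIsImport (l : String) : Bool :=
  PySem.Str.startswith (PySem.Str.strip l) "from src." ||
  PySem.Str.startswith (PySem.Str.strip l) "from ."

def pmcHasImportSrc (l : String) : Bool :=
  PySem.Str.isIn "import src." l

def pmcContinues (l : String) : Bool :=
  PySem.Str.endswith (PySem.Str.rstrip l) "\\"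

-- shared header preamble drop: shebang line, then encoding/coding line (both programs verbatim)
def pmcDropPreamble (lines : List String) : List String :=
  let lines :=
    match lines with
    | [] => lines
    | l :: rest => if PySem.Str.startswith l "#!" then rest else lines
  match lines with
  | [] => lines
  | l :: rest =>
      if PySem.Str.startswith l "# -*-" || PySem.Str.startswith l "# coding" then rest else lines

-- ===== PORT A =====
-- A's for-loop: state (seen_code, skip_import_continuation), branches in Python order
def pmcLoopA (isMain : Bool) : List String → Bool → Bool → List String
  | [], _, _ => []
  | l :: ls, seen, skip =>
    if !isMain && !seen && pmcIsHeader l then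
      pmcLoopA isMain ls seen skip
    else
      let seen := if !isMain && !seen then true else seen
      if skip then
        ("# " ++ l) :: pmcLoopA isMain ls seen (pmcContinues l)
      else if pmcIsImport l then
        ("# " ++ l) :: pmcLoopA isMain ls seen (pmcContinues l)
      else if pmcHasImportSrc l then
        ("# " ++ l) :: pmcLoopA isMain ls seen (pmcContinues l)
      else
        l :: pmcLoopA isMain ls seen skip

def process_module_content (content : String) (filepath : String) : String :=
  let lines := (PySem.Str.split? content "\n").getD []
  let lines := if filepath != "main.py" then pmcDropPreamble lines else lines
  PySem.Str.join "\n" (pmcLoopA (filepath == "main.py") lines false false)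

-- ===== PORT B =====
-- B pass 1: advance past the leading comment/blank run (the while-loop over `start`)
def pmcTrim : List String → List String
  | [] => []
  | l :: ls => if pmcIsHeader l then pmcTrim ls else l :: ls

-- B inner loop: consume the backslash-continuation block after line `prev`;
-- returns (commented block, remaining lines)
def pmcConsume (prev : String) : List String → List String × List String
  | [] => ([], [])
  | l :: ls =>
    if pmcContinues prev then
      let p := pmcConsume l ls
      (("# " ++ l) :: p.1, p.2)
    else ([], l :: ls)

theorem pmcConsume_snd_le (prev : String) (ls : List String) :
    (pmcConsume prev ls).2.length ≤ ls.length := by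
  induction ls generalizing prev with
  | nil => simp [pmcConsume]
  | cons l ls ih =>
    simp only [pmcConsume]
    split
    · exact Nat.le_trans (ih l) (Nat.le_succ _)
    · simp

-- B pass 2: index loop; import lines commented together with their continuation block
def pmcLoopB : List String → List String
  | [] => []
  | l :: ls =>
    if pmcIsImport l || pmcHasImportSrc l then
      ("# " ++ l) :: ((pmcConsume l ls).1 ++ pmcLoopB (pmcConsume l ls).2)
    else
      l :: pmcLoopB ls
termination_by ls => ls.length
decreasing_by
  · exact Nat.lt_succ_of_le (pmcConsume_snd_le l ls)
  · simp

def process_module_content_alt (content : String) (filepath : String) : String :=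
  let lines := (PySem.Str.split? content "\n").getD []
  let lines :=
    if filepath != "main.py" then pmcTrim (pmcDropPreamble lines) else lines
  PySem.Str.join "\n" (pmcLoopB lines)

-- ===== PRECONDITION & SPEC =====
def Spec_process_module_content (content : String) (filepath : String) (out : String) : Prop := out = process_module_content_alt content filepath
instance (content : String) (filepath : String) (out : String) : Decidable (Spec_process_module_content content filepath out) := by unfold Spec_process_module_content; infer_instance

-- ===== CLAIM (what is proved, stated in full; the proofs are below) =====
def Claim_equal_process_module_content : Prop := ∀ (content : String) (filepath : String), Dom_process_module_content content filepath → Spec_process_module_content content filepath (process_module_content content filepath)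

-- ===== LEMMAS AND PROOFS =====

-- while seen_code is false (non-main), A's loop just drops the leading comment/blank run
theorem pmcLoopA_trim (ls : List String) :
    pmcLoopA false ls false false = pmcLoopA false (pmcTrim ls) true false := by
  induction ls with
  | nil => rfl
  | cons l ls ih =>
    by_cases h : pmcIsHeader l = true
    · simpa [pmcLoopA, pmcTrim, h] using ih
    · simp [pmcLoopA, pmcTrim, h]

-- once the header phase is over (seen = true, or main.py), A's state machine computes
-- B's block-consuming loop; the skip=true state corresponds to B's pmcConsume
theorem pmcLoopA_eq_loopB (n : Nat) :
    ∀ ls : List String, ls.length ≤ n → ∀ (isMain s : Bool), (isMain || s) = true →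
      pmcLoopA isMain ls s false = pmcLoopB ls ∧
      (∀ prev, pmcContinues prev = true →
        pmcLoopA isMain ls s true = (pmcConsume prev ls).1 ++ pmcLoopB (pmcConsume prev ls).2) := by
  induction n with
  | zero =>
    intro ls hls isMain s h
    have : ls = [] := List.eq_nil_of_length_eq_zero (Nat.le_zero.mp hls)
    subst this
    constructor
    · simp [pmcLoopA, pmcLoopB]
    · intro prev _; simp [pmcLoopA, pmcLoopB, pmcConsume]
  | succ n ih =>
    intro ls hls isMain s h
    match ls with
    | [] =>
      constructor
      · simp [pmcLoopA, pmcLoopB]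
      · intro prev _; simp [pmcLoopA, pmcLoopB, pmcConsume]
    | l :: ls =>
      have hls' : ls.length ≤ n := by simpa using Nat.lt_succ_iff.mp (Nat.lt_of_lt_of_le (by simp) hls)
      have hseen : (!isMain && !s) = false := by
        cases isMain <;> cases s <;> simp_all
      have key : pmcLoopA isMain ls s (pmcContinues l)
          = (pmcConsume l ls).1 ++ pmcLoopB (pmcConsume l ls).2 := by
        by_cases hc : pmcContinues l = true
        · rw [hc]; exact (ih ls hls' isMain s h).2 l hc
        · have hcf : pmcContinues l = false := by simpa using hc
          have hcons : pmcConsume l ls = ([], ls) := by cases ls <;> simp [pmcConsume, hcf]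
          rw [hcf, hcons]; simpa using (ih ls hls' isMain s h).1
      constructor
      · -- skip = false: A's branch order collapses to B's combined import test
        by_cases h1 : pmcIsImport l = true
        · simp [pmcLoopA, pmcLoopB, hseen, h1, key]
        · have h1f : pmcIsImport l = false := by simpa using h1
          by_cases h2 : pmcHasImportSrc l = true
          · simp [pmcLoopA, pmcLoopB, hseen, h1f, h2, key]
          · have h2f : pmcHasImportSrc l = false := by simpa using h2
            simp [pmcLoopA, pmcLoopB, hseen, h1f, h2f, (ih ls hls' isMain s h).1]
      · -- skip = true: A comments line l exactly as B's pmcConsume does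
        intro prev hprev
        simp [pmcLoopA, pmcConsume, hseen, hprev, key]

-- ===== VERDICT (by name: the statement is the Claim_ definition above) =====
theorem process_module_content_spec : Claim_equal_process_module_content := by
  intro content filepath _
  unfold Spec_process_module_content process_module_content process_module_content_alt
  by_cases hfp : filepath = "main.py"
  · have h1 : (filepath != "main.py") = false := by simp [hfp]
    have h2 : (filepath == "main.py") = true := by simp [hfp]
    simp only [h1, h2, Bool.false_eq_true, if_false]
    exact congrArg _ ((pmcLoopA_eq_loopB ((PySem.Str.split? content "\n").getD []).length
      _ (le_refl _) true false rfl).1)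
  · have h1 : (filepath != "main.py") = true := by simp [hfp]
    have h2 : (filepath == "main.py") = false := by simp [hfp]
    simp only [h1, h2, if_true]
    rw [pmcLoopA_trim]
    exact congrArg _ ((pmcLoopA_eq_loopB (pmcTrim (pmcDropPreamble ((PySem.Str.split? content "\n").getD []))).length
      _ (le_refl _) false true rfl).1)
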